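-- pv_equiv track=rewrite | github.com/mahmoudessam820/quotes-app | backend/wikipedia_api.py | quotes_data
-- ===== SOURCE A (Python) =====
-- def quotes_data(api_data):
--     quotes = {}
--     for data in api_data:
--         if data['author']:
--             if not data['author'] in quotes:
--                 quotes[data['author']] = []
--             quotes[data['author']].append(data['text'])
--     return quotes
-- ===== SOURCE B (Python) =====
-- def quotes_data(api_data):
--     rows = [d for d in api_data if d['author']]
--     authors = list(dict.fromkeys(d['author'] for d in rows))
--     return {a: [d['text'] for d in rows if d['author'] == a] for a in authors}
-- ===== Notes on version B (the rewrite author's own statement) =====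
-- stated objective: alternative
-- what changed: Replaced the single-pass dict-accumulation loop by a three-stage pipeline: filter rows with truthy author, take the first-appearance-deduplicated author list, and build each author's text list with a per-author comprehension.
import Mathlib
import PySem

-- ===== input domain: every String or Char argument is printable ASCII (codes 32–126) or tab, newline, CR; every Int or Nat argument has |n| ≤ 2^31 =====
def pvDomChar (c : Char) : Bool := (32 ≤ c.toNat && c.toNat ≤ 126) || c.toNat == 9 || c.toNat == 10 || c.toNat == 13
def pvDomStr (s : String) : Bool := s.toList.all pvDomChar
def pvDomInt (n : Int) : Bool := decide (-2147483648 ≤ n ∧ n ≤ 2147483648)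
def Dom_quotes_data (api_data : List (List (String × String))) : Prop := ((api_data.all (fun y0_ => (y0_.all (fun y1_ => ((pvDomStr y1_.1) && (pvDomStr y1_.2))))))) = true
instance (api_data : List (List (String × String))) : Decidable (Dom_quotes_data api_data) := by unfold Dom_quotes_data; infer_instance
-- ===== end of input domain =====

-- B replaces A's single-pass dict-accumulation loop by filter + ordered dedup of the authors +
-- a per-author collection pass (alternative decomposition, not claimed faster).

-- ===== PORT A =====
-- a row is a Python dict: data['author'] / data['text'] is the first match in its association list
def quotes_data (api_data : List (List (String × String))) : List (String × List String) :=
  (api_data.foldl (fun quotes data =>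
      let author := (PySem.Dict.mk data).getD "author" ""
      if author ≠ "" then
        let quotes1 := if quotes.contains author = false then quotes.insert author [] else quotes
        quotes1.modify author [] (fun l => l ++ [(PySem.Dict.mk data).getD "text" ""])
      else quotes)
    PySem.Dict.empty).items

-- ===== PORT B =====
def quotes_data_alt (api_data : List (List (String × String))) : List (String × List String) :=
  let rows := api_data.filter (fun d => (PySem.Dict.mk d).getD "author" "" ≠ "")
  let authors := PySem.List.dedup (rows.map (fun d => (PySem.Dict.mk d).getD "author" ""))
  authors.map (fun a =>
    (a, (rows.filter (fun d => (PySem.Dict.mk d).getD "author" "" = a)).map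
          (fun d => (PySem.Dict.mk d).getD "text" "")))

-- ===== PRECONDITION & SPEC =====
-- Pre_ excludes exactly the inputs on which the Python A raises KeyError: a row without an
-- 'author' key, or a row whose truthy author comes without a 'text' key (B raises there too).
def Pre_quotes_data (api_data : List (List (String × String))) : Prop :=
  ∀ d ∈ api_data, (PySem.Dict.mk d).contains "author" = true ∧
    ((PySem.Dict.mk d).getD "author" "" ≠ "" → (PySem.Dict.mk d).contains "text" = true)
instance (api_data : List (List (String × String))) : Decidable (Pre_quotes_data api_data) := by
  unfold Pre_quotes_data; infer_instance
def pvWitness_quotes_data : (List (List (String × String))) :=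
  [[("author", "ada"), ("text", "hi")], [("author", ""), ("x", "y")]]

def Spec_quotes_data (api_data : List (List (String × String))) (out : List (String × List String)) : Prop := out = quotes_data_alt api_data
instance (api_data : List (List (String × String))) (out : List (String × List String)) : Decidable (Spec_quotes_data api_data out) := by unfold Spec_quotes_data; infer_instance

-- ===== CLAIM (what is proved, stated in full; the proofs are below) =====
def Claim_equal_quotes_data : Prop := ∀ (api_data : List (List (String × String))), Dom_quotes_data api_data → Pre_quotes_data api_data → Spec_quotes_data api_data (quotes_data api_data)

-- ===== LEMMAS AND PROOFS =====

-- A's "if author not in quotes: quotes[author] = []" followed by the append is one modify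
theorem pv_step_eq (q : PySem.Dict String (List String)) (k : String) (f : List String → List String) :
    ((if q.contains k = false then q.insert k [] else q).modify k [] f) = q.modify k [] f := by
  by_cases h : q.contains k = false
  · rw [if_pos h]
    have hgd : (q.insert k []).getD k [] = [] := by simp [PySem.Dict.getD_insert_self]
    apply PySem.Dict.ext
    simp only [PySem.Dict.modify]
    rw [hgd, PySem.Dict.insert_insert_self, PySem.Dict.items_insert_of_not_contains _ _ h,
      PySem.Dict.getD_of_not_contains _ _ h, PySem.Dict.items_insert_of_not_contains _ _ h]
  · rw [if_neg h]

def pvKey (d : List (String × String)) : String := (PySem.Dict.mk d).getD "author" ""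
def pvTxt (d : List (String × String)) : String := (PySem.Dict.mk d).getD "text" ""

-- A's loop body, rewritten with pv_step_eq into a plain grouping modify
theorem pv_foldA_eq (l : List (List (String × String))) (q : PySem.Dict String (List String)) :
    l.foldl (fun quotes data =>
      let author := (PySem.Dict.mk data).getD "author" ""
      if author ≠ "" then
        let quotes1 := if quotes.contains author = false then quotes.insert author [] else quotes
        quotes1.modify author [] (fun l => l ++ [(PySem.Dict.mk data).getD "text" ""])
      else quotes) q
    = l.foldl (fun quotes data =>
        if pvKey data ≠ "" then quotes.modify (pvKey data) [] (fun l => l ++ [pvTxt data]) else quotes) q := by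
  induction l generalizing q with
  | nil => rfl
  | cons d l ih =>
      simp only [List.foldl_cons]
      rw [ih]
      congr 1
      by_cases h : pvKey d ≠ ""
      · simp only [pvKey, pvTxt] at *
        rw [if_pos h, if_pos h, pv_step_eq]
      · simp only [pvKey, pvTxt] at *
        rw [if_neg h, if_neg h]

theorem pv_main (api_data : List (List (String × String))) :
    quotes_data api_data = quotes_data_alt api_data := by
  unfold quotes_data quotes_data_alt
  rw [pv_foldA_eq]
  have hfilt : api_data.foldl (fun quotes data =>
        if pvKey data ≠ "" then quotes.modify (pvKey data) [] (fun l => l ++ [pvTxt data]) else quotes)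
        PySem.Dict.empty
      = (api_data.filter (fun d => decide (pvKey d ≠ ""))).foldl
          (fun quotes data => quotes.modify (pvKey data) [] (fun l => l ++ [pvTxt data]))
          PySem.Dict.empty := by
    rw [List.foldl_filter]
    simp
  rw [hfilt]
  set rows := api_data.filter (fun d => decide (pvKey d ≠ "")) with hrows
  have hnodup : ((rows.foldl (fun q d => q.modify (pvKey d) [] (fun l => l ++ [pvTxt d])) PySem.Dict.empty)).keys.Nodup :=
    PySem.Dict.nodup_keys_foldl_modify_key rows pvKey [] (fun _ d => fun l => l ++ [pvTxt d]) _ (by simp)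
  have hkeys : ((rows.foldl (fun q d => q.modify (pvKey d) [] (fun l => l ++ [pvTxt d])) PySem.Dict.empty)).keys
      = PySem.List.dedup (rows.map pvKey) := by
    rw [PySem.Dict.keys_foldl_modify_key rows pvKey [] (fun _ d => fun l => l ++ [pvTxt d])]
    simp [PySem.Set.update_nil_left]
  have hgetD : ∀ a, ((rows.foldl (fun q d => q.modify (pvKey d) [] (fun l => l ++ [pvTxt d])) PySem.Dict.empty)).getD a []
      = (rows.filter (fun d => pvKey d == a)).map pvTxt := by
    intro a
    have hmap : rows.foldl (fun q d => q.modify (pvKey d) [] (fun l => l ++ [pvTxt d])) PySem.Dict.empty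
        = (rows.map (fun d => (pvKey d, pvTxt d))).foldl (fun q p => q.modify p.1 [] (fun l => l ++ [p.2])) PySem.Dict.empty := by
      rw [List.foldl_map]
    rw [hmap, PySem.Dict.getD_foldl_modify_append]
    simp [List.filter_map, Function.comp_def]
  rw [PySem.Dict.items_eq_map_keys _ hnodup [], hkeys]
  simp only [pvKey, pvTxt] at *
  apply List.map_congr_left
  intro a _
  rw [hgetD, hrows]
  simp only [List.filter_filter]
  congr 1

-- ===== VERDICT (by name: the statement is the Claim_ definition above) =====
theorem quotes_data_spec : Claim_equal_quotes_data := by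
  intro api_data _ _
  unfold Spec_quotes_data
  exact pv_main api_data
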